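-- pv_equiv track=rewrite | github.com/aldiarsaparov/PP2 | LABS/LAB3/functions/8.py | func
-- ===== SOURCE A (Python) =====
-- def func(s):
--     t = "".join(str(i) for i in s)
--     to_remove = "12345689"
--
--     for char in to_remove:
--         t = t.replace(char, "")
--
--     if t.find("007") != -1:
--         return True
--     else:
--         return False
-- ===== SOURCE B (Python) =====
-- def func(s):
--     zeros = 0
--     for c in "".join(str(i) for i in s):
--         if c == '0':
--             zeros += 1
--         elif c == '7':
--             if zeros >= 2:
--                 return True
--             zeros = 0
--         elif c in "12345689":
--             pass
--         else:
--             zeros = 0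
--     return False
-- ===== Notes on version B (the rewrite author's own statement) =====
-- stated objective: faster
-- what changed: Replaces the eight whole-string .replace passes plus a find('007') with a single left-to-right scan of the joined string that counts consecutive kept '0's and fires on a kept '7' after at least two of them. (one pass, no intermediate strings; measured ~2x)
import Mathlib
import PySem

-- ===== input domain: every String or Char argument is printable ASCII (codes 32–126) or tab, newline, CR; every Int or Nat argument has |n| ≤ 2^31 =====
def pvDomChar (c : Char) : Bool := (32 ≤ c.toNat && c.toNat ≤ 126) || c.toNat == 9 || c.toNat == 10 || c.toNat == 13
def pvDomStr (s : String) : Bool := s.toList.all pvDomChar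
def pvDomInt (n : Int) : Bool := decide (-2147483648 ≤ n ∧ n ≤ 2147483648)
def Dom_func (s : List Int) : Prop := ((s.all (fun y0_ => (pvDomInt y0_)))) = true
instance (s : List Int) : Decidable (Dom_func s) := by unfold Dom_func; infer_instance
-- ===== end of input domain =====

-- B replaces A's eight whole-string .replace passes + find("007") by one scan of the
-- joined string with a counter of consecutive kept '0's (alternative decomposition).

-- ===== PORT A =====
-- t = "".join(str(i) for i in s), on the List Char side
def pyJoined (s : List Int) : List Char :=
  PySem.Chars.join [] (s.map (fun i => (PySem.Int.toStr i).toList))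

def func (s : List Int) : Bool :=
  let t := pyJoined s
  -- for char in "12345689": t = t.replace(char, "")
  let t := ("12345689".toList).foldl (fun acc ch => PySem.Chars.replace acc [ch] []) t
  if PySem.Chars.find t "007".toList ≠ -1 then true else false

-- ===== PORT B =====
-- the scan loop of Source B; 'c in "12345689"' for a single char c is membership (exact here)
def altChars : List Char → Nat → Bool
  | [], _ => false
  | c :: rest, zeros =>
    if c = '0' then altChars rest (zeros + 1)
    else if c = '7' then
      if 2 ≤ zeros then true else altChars rest 0
    else if ("12345689".toList).contains c then altChars rest zeros
    else altChars rest 0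

def func_alt (s : List Int) : Bool :=
  altChars (pyJoined s) 0

-- ===== PRECONDITION & SPEC =====
def Spec_func (s : List Int) (out : Bool) : Prop := out = func_alt s
instance (s : List Int) (out : Bool) : Decidable (Spec_func s out) := by unfold Spec_func; infer_instance

-- ===== CLAIM (what is proved, stated in full; the proofs are below) =====
def Claim_equal_func : Prop := ∀ (s : List Int), Dom_func s → Spec_func s (func s)

-- ===== LEMMAS AND PROOFS =====

-- replace of a single char by "" is a filter
lemma replace_go_filter (c : Char) (fuel : Nat) (l acc : List Char) (h : l.length ≤ fuel) :
    PySem.Chars.replace.go [c] [] fuel l acc = acc.reverse ++ l.filter (fun x => x ≠ c) := by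
  induction fuel generalizing l acc with
  | zero =>
    cases l with
    | nil => simp [PySem.Chars.replace.go]
    | cons a t => simp at h
  | succ n ih =>
    cases l with
    | nil => simp [PySem.Chars.replace.go]
    | cons a t =>
      simp only [PySem.Chars.replace.go]
      by_cases hac : a = c
      · subst hac
        have hp : List.isPrefixOf [a] (a :: t) = true := by
          simp [List.isPrefixOf]
        rw [if_pos hp]
        have hd : List.drop [a].length (a :: t) = t := rfl
        simp only [List.length_cons] at h
        rw [hd, List.reverse_nil, List.nil_append, ih t acc (by omega)]
        simp
      · have hp : List.isPrefixOf [c] (a :: t) = false := by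
          simp [List.isPrefixOf]
          exact fun hh => absurd hh.symm hac
        rw [if_neg (by simp [hp])]
        simp only [List.length_cons] at h
        rw [ih t _ (by omega)]
        simp [hac]

lemma replace_single (c : Char) (l : List Char) :
    PySem.Chars.replace l [c] [] = l.filter (fun x => x ≠ c) := by
  simp only [PySem.Chars.replace, List.isEmpty_cons]
  exact replace_go_filter c l.length l [] le_rfl

-- the fold of single-char replaces is one filter
lemma fold_replace (rs : List Char) (t : List Char) :
    rs.foldl (fun acc ch => PySem.Chars.replace acc [ch] []) t
      = t.filter (fun x => !rs.contains x) := by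
  induction rs generalizing t with
  | nil => simp
  | cons r rs ih =>
    rw [List.foldl_cons, replace_single, ih, List.filter_filter]
    apply List.filter_congr
    intro x _
    by_cases hx : x = r <;> simp [hx]

-- "007" is a prefix of z zeros ++ c :: ys exactly when z = 2 and c = '7' (c ≠ '0')
lemma prefix007 (z : Nat) (c : Char) (ys : List Char) (hc : c ≠ '0') :
    (['0','0','7'] <+: (List.replicate z '0' ++ c :: ys)) ↔ (z = 2 ∧ c = '7') := by
  match z with
  | 0 =>
    simp [List.cons_prefix_cons]
    intro h; exact absurd h.symm hc
  | 1 =>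
    simp [List.replicate, List.cons_prefix_cons]
    intro h; exact absurd h.symm hc
  | 2 =>
    simp [List.replicate, List.cons_prefix_cons, eq_comm]
  | (n+3) =>
    simp [List.replicate, List.cons_prefix_cons]

-- "007" inside z zeros ++ c :: ys (c ≠ '0'): either the '7' closes it (c='7', z≥2) or it is in ys
lemma infix007 (z : Nat) (c : Char) (ys : List Char) (hc : c ≠ '0') :
    (['0','0','7'] <:+: (List.replicate z '0' ++ c :: ys))
      ↔ ((c = '7' ∧ 2 ≤ z) ∨ ['0','0','7'] <:+: ys) := by
  induction z with
  | zero =>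
    rw [List.replicate_zero, List.nil_append, List.infix_cons_iff]
    constructor
    · rintro (h | h)
      · rw [List.cons_prefix_cons] at h; exact absurd h.1.symm hc
      · exact Or.inr h
    · rintro (⟨_, hz⟩ | h)
      · omega
      · exact Or.inr h
  | succ n ih =>
    rw [List.replicate_succ, List.cons_append, List.infix_cons_iff,
        show ('0' :: (List.replicate n '0' ++ c :: ys)) = List.replicate (n+1) '0' ++ c :: ys from by
          rw [List.replicate_succ, List.cons_append],
        prefix007 (n+1) c ys hc, ih]
    constructor
    · rintro (⟨h2, h7⟩ | ⟨h7, hn⟩ | h)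
      · exact Or.inl ⟨h7, by omega⟩
      · exact Or.inl ⟨h7, by omega⟩
      · exact Or.inr h
    · rintro (⟨h7, hn⟩ | h)
      · by_cases hn1 : n = 1
        · exact Or.inl ⟨by omega, h7⟩
        · exact Or.inr (Or.inl ⟨h7, by omega⟩)
      · exact Or.inr (Or.inr h)

-- "007" is never inside zeros only
lemma not_infix_replicate (z : Nat) : ¬ (['0','0','7'] <:+: List.replicate z '0') := by
  intro h
  have h7 : '7' ∈ List.replicate z '0' := h.subset (by simp)
  rw [List.mem_replicate] at h7
  exact absurd h7.2 (by decide)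

-- invariant of B's scan: it fires iff "007" occurs in (pending zeros ++ filtered rest)
lemma alt_iff (t : List Char) (z : Nat) :
    altChars t z = true
      ↔ ['0','0','7'] <:+: (List.replicate z '0' ++ t.filter (fun x => !("12345689".toList).contains x)) := by
  induction t generalizing z with
  | nil =>
    simp only [altChars, List.filter_nil, List.append_nil]
    simp [not_infix_replicate z]
  | cons c rest ih =>
    simp only [altChars]
    by_cases h0 : c = '0'
    · subst h0
      rw [if_pos rfl, ih (z+1)]
      have : List.filter (fun x => !("12345689".toList).contains x) ('0' :: rest)
          = '0' :: rest.filter (fun x => !("12345689".toList).contains x) := by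
        simp [List.filter_cons]
      rw [this, show (List.replicate z '0' ++ '0' :: rest.filter (fun x => !("12345689".toList).contains x))
            = List.replicate (z+1) '0' ++ rest.filter (fun x => !("12345689".toList).contains x) from by
          rw [List.replicate_succ', List.append_assoc]; rfl]
    · rw [if_neg h0]
      by_cases h7 : c = '7'
      · subst h7
        rw [if_pos rfl]
        have hf : List.filter (fun x => !("12345689".toList).contains x) ('7' :: rest)
            = '7' :: rest.filter (fun x => !("12345689".toList).contains x) := by
          simp [List.filter_cons]
        rw [hf, infix007 z '7' _ (by decide)]
        by_cases hz : 2 ≤ z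
        · simp [hz]
        · rw [if_neg hz, ih 0]
          simp [hz]
      · rw [if_neg h7]
        by_cases hr : ("12345689".toList).contains c
        · rw [if_pos hr, ih z]
          have hb : (!("12345689".toList).contains c) = false := by rw [hr]; rfl
          rw [List.filter_cons, hb]
          simp only [Bool.false_eq_true, if_false]
        · rw [if_neg hr, ih 0]
          have hb : (!("12345689".toList).contains c) = true := by
            rw [Bool.eq_false_iff.mpr hr]; rfl
          rw [List.filter_cons, hb, if_pos rfl, infix007 z c _ h0, List.replicate_zero,
            List.nil_append]
          simp [h7]

-- ===== VERDICT (by name: the statement is the Claim_ definition above) =====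
theorem func_spec : Claim_equal_func := by
  intro s _
  show func s = func_alt s
  rw [Bool.eq_iff_iff]
  unfold func func_alt
  simp only [fold_replace]
  constructor
  · intro h
    rw [alt_iff]
    split at h
    · next hfind =>
      rw [PySem.Chars.find_ne_neg_one_iff] at hfind
      simpa using hfind
    · exact absurd h (by simp)
  · intro h
    rw [alt_iff] at h
    simp only [List.replicate_zero, List.nil_append] at h
    rw [if_pos (by rw [PySem.Chars.find_ne_neg_one_iff]; exact h)]
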